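-- pv_equiv track=rewrite | github.com/democraftmc/Phytlas | models.py | _resolve_texture_value
-- ===== SOURCE A (Python) =====
-- from typing import Any, Iterable, Mapping, MutableMapping
--
-- def _resolve_texture_value(value: str, textures: Mapping[str, str], depth: int = 0) -> str:
--     if depth > 10:
--         raise ValueError("Exceeded texture indirection depth")
--     if value.startswith("#"):
--         key = value[1:]
--         target = textures.get(key)
--         if target is None:
--             raise ValueError(f"Texture reference {value} could not be resolved")
--         return _resolve_texture_value(target, textures, depth + 1)
--     return value
-- ===== SOURCE B (Python) =====
-- def _resolve_texture_value(value: str, textures, depth: int = 0) -> str: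
--     # Iterative: budget of 11 - depth resolution steps instead of tail recursion.
--     for _ in range(11 - depth):
--         if not value.startswith("#"):
--             return value
--         target = textures.get(value[1:])
--         if target is None:
--             raise ValueError(f"Texture reference {value} could not be resolved")
--         value = target
--     raise ValueError("Exceeded texture indirection depth")
-- ===== Notes on version B (the rewrite author's own statement) =====
-- stated objective: idiomatic
-- what changed: Replaces the tail recursion carrying a depth counter by a single for-loop over a precomputed step budget range(11 - depth), with the depth-exceeded error moved to loop exhaustion.
import Mathlib
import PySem

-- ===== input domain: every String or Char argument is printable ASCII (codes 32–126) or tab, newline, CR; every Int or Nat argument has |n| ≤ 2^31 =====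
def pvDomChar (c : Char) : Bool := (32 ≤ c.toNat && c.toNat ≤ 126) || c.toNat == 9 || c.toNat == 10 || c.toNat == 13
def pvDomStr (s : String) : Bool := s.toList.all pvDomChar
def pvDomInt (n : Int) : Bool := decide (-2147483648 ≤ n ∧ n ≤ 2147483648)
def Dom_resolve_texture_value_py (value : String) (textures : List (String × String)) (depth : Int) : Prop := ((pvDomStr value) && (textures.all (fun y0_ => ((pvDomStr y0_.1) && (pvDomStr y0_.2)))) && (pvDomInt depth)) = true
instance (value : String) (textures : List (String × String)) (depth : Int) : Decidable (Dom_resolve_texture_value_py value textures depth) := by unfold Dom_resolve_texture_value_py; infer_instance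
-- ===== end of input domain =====

-- B replaces A's tail recursion by one loop over a precomputed step budget range(11 - depth);
-- return-value equivalence is proved on Pre_ (the inputs where A raises no ValueError).

-- ===== PORT A =====
-- Literal port of the recursive A; the two 'raise ValueError' sites return "" (excluded by Pre_).
def resolve_texture_value_py (value : String) (textures : List (String × String)) (depth : Int) : String :=
  if 10 < depth then ""  -- raise ValueError("Exceeded texture indirection depth")
  else if PySem.Str.startswith value "#" then
    let key := PySem.Str.slice value (some 1) none  -- value[1:]
    match (PySem.Dict.mk textures).get? key with    -- textures.get(key)
    | none => ""  -- raise ValueError(f"Texture reference {value} could not be resolved")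
    | some target => resolve_texture_value_py target textures (depth + 1)
  else value
termination_by (11 - depth).toNat
decreasing_by omega

-- ===== PORT B =====
-- The body of Source B's for-loop; the Nat argument is the remaining iterations of range(11 - depth).
def pvAltLoop (value : String) (textures : List (String × String)) : Nat → String
  | 0 => ""  -- loop exhausted: raise ValueError("Exceeded texture indirection depth")
  | n + 1 =>
    if PySem.Str.startswith value "#" = false then value
    else
      match (PySem.Dict.mk textures).get? (PySem.Str.slice value (some 1) none) with
      | none => ""  -- raise ValueError(f"Texture reference {value} could not be resolved")
      | some target => pvAltLoop target textures n

def resolve_texture_value_py_alt (value : String) (textures : List (String × String)) (depth : Int) : String :=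
  pvAltLoop value textures (11 - depth).toNat

-- ===== PRECONDITION & SPEC =====
-- pvChainOK textures v n: following '#'-references from v reaches a non-'#' value within n
-- successful lookups (a condition on the reference chain stored in the input map).
def pvChainOK (textures : List (String × String)) : String → Nat → Bool
  | v, 0 => !(PySem.Str.startswith v "#")
  | v, n + 1 =>
    if PySem.Str.startswith v "#" then
      match (PySem.Dict.mk textures).get? (PySem.Str.slice v (some 1) none) with
      | none => false
      | some t => pvChainOK textures t n
    else true

-- Pre_ excludes exactly the inputs where A raises ValueError: depth already past the limit, a
-- dangling '#'-reference, or a chain needing more than 10 - depth indirections (a chain that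
-- resolves at all does so within textures.length lookups, hence the min).
def Pre_resolve_texture_value_py (value : String) (textures : List (String × String)) (depth : Int) : Prop :=
  depth ≤ 10 ∧ pvChainOK textures value (min (10 - depth).toNat textures.length) = true
instance (value : String) (textures : List (String × String)) (depth : Int) : Decidable (Pre_resolve_texture_value_py value textures depth) := by unfold Pre_resolve_texture_value_py; infer_instance

def pvWitness_resolve_texture_value_py : String × (List (String × String)) × Int :=
  ("#a", [("a", "stone")], 0)

def Spec_resolve_texture_value_py (value : String) (textures : List (String × String)) (depth : Int) (out : String) : Prop := out = resolve_texture_value_py_alt value textures depth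
instance (value : String) (textures : List (String × String)) (depth : Int) (out : String) : Decidable (Spec_resolve_texture_value_py value textures depth out) := by unfold Spec_resolve_texture_value_py; infer_instance

-- ===== CLAIM (what is proved, stated in full; the proofs are below) =====
def Claim_equal_resolve_texture_value_py : Prop := ∀ (value : String) (textures : List (String × String)) (depth : Int), Dom_resolve_texture_value_py value textures depth → Pre_resolve_texture_value_py value textures depth → Spec_resolve_texture_value_py value textures depth (resolve_texture_value_py value textures depth)

-- ===== LEMMAS AND PROOFS =====

-- The two ports agree on every input (both return "" at the corresponding raise sites).
theorem pv_ports_agree (value : String) (textures : List (String × String)) (depth : Int) :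
    resolve_texture_value_py value textures depth = pvAltLoop value textures (11 - depth).toNat := by
  fun_induction resolve_texture_value_py value textures depth with
  | case1 value depth h =>
      have h0 : (11 - depth).toNat = 0 := by omega
      rw [h0]; rfl
  | case2 value depth h hs key hget =>
      have h1 : (11 - depth).toNat = (11 - (depth + 1)).toNat + 1 := by omega
      have hget' : (PySem.Dict.mk textures).get? (PySem.Str.slice value (some 1) none) = none := hget
      simp at hs
      rw [h1]
      simp [pvAltLoop, hs, hget']
  | case3 value depth h hs key target hget ih =>
      have h1 : (11 - depth).toNat = (11 - (depth + 1)).toNat + 1 := by omega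
      have hget' : (PySem.Dict.mk textures).get? (PySem.Str.slice value (some 1) none) = some target := hget
      simp at hs
      rw [h1]
      simp [pvAltLoop, hs, hget']
      exact ih
  | case4 value depth h hs =>
      have h1 : (11 - depth).toNat = (11 - (depth + 1)).toNat + 1 := by omega
      simp at hs
      rw [h1]
      simp [pvAltLoop, hs]

-- ===== VERDICT (by name: the statement is the Claim_ definition above) =====
theorem resolve_texture_value_py_spec : Claim_equal_resolve_texture_value_py := by
  intro value textures depth _ _
  unfold Spec_resolve_texture_value_py resolve_texture_value_py_alt
  exact pv_ports_agree value textures depth
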